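/- GENERATED by tools/from_farm_form.py from prooffarm-gif/accepted/DGifOpen.4/Lemmas.lean (a worked proof of the farm's unit `DGifOpen.4`,
   accepted by the verdict) — do not edit. -/
import Gif.Spec.Units.DGifOpen_4
import Gif.Spec.AllSegs

/-!
  Lemmas for the unit `DGifOpen.4` (dgif_lib.c:217-225): the segment is walked in steps that meet at the return addresses of its
  calls; the assertion at `ret14` is `Opened` itself (with that cut), the two behind the `free`s are private.
-/

open X86 X86.User Asan ProgX.Base ProgX.Base.Spec Gif.Spec

set_option maxRecDepth 4000
set_option maxHeartbeats 4000000

namespace Gif.Spec.DGifOpen_4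

/-- **Where `*Error` is**: NULL, or 4 bytes of a stack object of a CALLER's frame: a stack address at or above the clean stack's end
`top` (every active frame lies there), off the cursor. In both cases its 4 bytes end below the heap's region and miss the
cursor. -/
theorem d4_err_range {H : Heap} {rest : List Obj} {frames : List (Nat × FrameLayout)} {R : Rd} {p top : Nat} {mem : Mem}
    (herr : ErrPtr H rest frames R p) (hcur : 0x700000 ≤ R.cur) (hinv : HeapInv H rest frames top mem) :
    p + 4 ≤ 0x800000 ∧ (p + 4 ≤ R.cur ∨ R.cur + 16 ≤ p) ∧ (p = 0 ∨ (0x700000 ≤ p ∧ top ≤ p)) := by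
  rcases herr with h0 | ⟨hl, hlo, hhi, hoff⟩
  · omega
  · refine ⟨hhi, hoff, Or.inr ⟨hlo, ?_⟩⟩
    obtain ⟨o, ho, k1, k2⟩ := hl
    rcases List.mem_append.mp ho with hs | hoth
    · -- a stack object: its frame is active, at or above `top`
      obtain ⟨bF, hbF, g1, g2⟩ := ShadowInv.stackObj_gran hinv.shadow.stack hs
      obtain ⟨hF, a8, atop, ahi, _⟩ := hinv.shadow.stack.active bF hbF
      have hs8 := hF.1
      unfold Obj.gLo at g1
      unfold Obj.gHi at g2
      omega
    · exfalso
      rcases List.mem_append.mp hoth with hheap | hr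
      · -- a heap object lies at or above 800000H
        obtain ⟨⟨c, hlive⟩, _⟩ := Heap.live_of_mem_liveObjs hheap
        have h1 := hinv.heap.obj_range hlive
        have h2 := hinv.heap.offStack
        have h3 := hinv.heap.room
        have h4 := hinv.heap.size_le_cap hlive
        simp only at h1 h4
        omega
      · -- an object of `rest` lies off the stack
        have hoff' := hinv.shadow.off o (List.mem_append_right _ hr)
        unfold OffStack at hoff'
        omega

/-- **The heap's precondition at a callee's entry, for the present heap `Hc` under the own frame**: the state `s` differs from the
memory `mem` of the invariant by stores into the function's stack and into `*Error` only, and its stack pointer is 8 below the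
body's. -/
theorem d4_heapPre {H Hc : Heap} {rest : List Obj} {frames : List (Nat × FrameLayout)} {e s : State} {mem : Mem} {p : Nat}
    (hpre : HeapPre H rest frames e) (hregion : SameRegion H Hc)
    (hinv : HeapInv Hc rest (DGifOpen.framesIn frames e) ((e.reg .rsp).toNat - 120) mem)
    (hun : ShadowUntouched mem s.mem)
    (hs : Mem.SameExcept [⟨(e.reg .rsp).toNat - 528, (e.reg .rsp).toNat⟩, ⟨p, p + 4⟩] mem s.mem)
    (hp : p + 4 ≤ 0x800000)
    (htop : (e.reg .rsp).toNat + 8 ≤ 0x800000)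
    (hrsp : (s.reg .rsp).toNat + 8 = (e.reg .rsp).toNat - 120) :
    HeapPre Hc rest (DGifOpen.framesIn frames e) s := by
  have hbase : Hc.base = 0x800000 := by
    rw [hregion.1]
    exact hpre.base
  have hlimit : Hc.limit = 0xC00000 := by
    rw [hregion.2]
    exact hpre.limit
  refine ⟨?_, hbase, hlimit, hpre.text, hpre.offText⟩
  rw [hrsp]
  refine hinv.sameExcept hun hs ?_
  intro w hw
  left
  left
  rw [hbase]
  rcases List.mem_cons.mp hw with ew | hw
  · rw [ew]
    simp only
    omega
  · have ew := List.mem_singleton.mp hw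
    rw [ew]
    simp only
    omega

/-- **`Opened` at another cut, after stores into the function's stack only**: the state `s` has the registers of `v` that the
assertion names, the slots and the return address are given, its memory differs from `v`'s inside `[RA − 528, RA)`. The heap's
invariant, the state invariant and the reader's measure are carried over the stack window (it lies below the cursor). -/
theorem d4_opened_stack {cut cut' : Word} {H : Heap} {rest : List Obj} {frames : List (Nat × FrameLayout)} {R : Rd} {Hc : Heap}
    {gif pv : Nat} {u₀ e : State} {ret : Word} {v s : State}
    (hcore : DGifOpen.Core cut H rest frames R u₀ e ret v) (hregion : SameRegion H Hc)
    (hinv : HeapInv Hc rest (DGifOpen.framesIn frames e) ((e.reg .rsp).toNat - 120) v.mem)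
    (hok : GifOK Hc (DGifOpen.fresh gif pv) R v.mem)
    (hctx : Ctx rest frames R) (hpre : HeapPre H rest frames e)
    (htop : (e.reg .rsp).toNat + 8 ≤ 0x800000) (hroom : 0x700000 + 528 ≤ (e.reg .rsp).toNat)
    (hrip : s.rip = cut') (hrsp : s.reg .rsp = e.reg .rsp - 120)
    (e12 : s.reg .r12 = v.reg .r12) (e13 : s.reg .r13 = v.reg .r13) (ebx : s.reg .rbx = v.reg .rbx)
    (ebp : s.reg .rbp = v.reg .rbp)
    (c_r13 : v.reg .r13 = e.reg .rdx) (hrbx : (v.reg .rbx).toNat = gif) (hrbp : (v.reg .rbp).toNat = pv)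
    (hs15 : s.mem.readLE (e.reg .rsp - 8) 8 = (e.reg .r15).toNat)
    (hs14 : s.mem.readLE (e.reg .rsp - 16) 8 = (e.reg .r14).toNat)
    (hs13 : s.mem.readLE (e.reg .rsp - 24) 8 = (e.reg .r13).toNat)
    (hs12 : s.mem.readLE (e.reg .rsp - 32) 8 = (e.reg .r12).toNat)
    (hsbp : s.mem.readLE (e.reg .rsp - 40) 8 = (e.reg .rbp).toNat)
    (hsbx : s.mem.readLE (e.reg .rsp - 48) 8 = (e.reg .rbx).toNat)
    (hsra : UInt64.ofNat (s.mem.readLE (e.reg .rsp) 8) = ret)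
    (hsv : Mem.SameExcept [⟨(e.reg .rsp).toNat - 528, (e.reg .rsp).toNat⟩] v.mem s.mem)
    (hunv : ShadowUntouched v.mem s.mem)
    (hsame1 : Mem.SameExcept
      [⟨(e.reg .rsp).toNat - 528, (e.reg .rsp).toNat⟩,
       shadowSpan ((e.reg .rsp).toNat - 120) ((e.reg .rsp).toNat - 56),
       ⟨0x800000, 0x1000020⟩,
       ⟨(e.reg .rdx).toNat, (e.reg .rdx).toNat + 4⟩,
       ⟨R.cur, R.cur + 8⟩] e.mem s.mem)
    (hcodeIn : (conv u₀).code.In s.mem) (habi : (conv u₀).inv s) :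
    DGifOpen.Opened cut' H rest frames R Hc gif pv u₀ e ret s := by
  have hcur := hctx.cursor_range hpre.inv.shadow
  have hbase : Hc.base = 0x800000 := by
    rw [hregion.1]
    exact hpre.base
  -- the one window is a stack window below the cursor: loose, and off the heap's region
  have hloose : ∀ w, w ∈ [(⟨(e.reg .rsp).toNat - 528, (e.reg .rsp).toNat⟩ : Span)] → Loose Hc (DGifOpen.fresh gif pv) R w := by
    intro w hw
    have ew := List.mem_singleton.mp hw
    rw [ew]
    apply Loose.stack hinv.heap
    · simp only
      omega
    · simp only
      omega
    · simp only
      omega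
  have hinv1 : HeapInv Hc rest (DGifOpen.framesIn frames e) ((e.reg .rsp).toNat - 120) s.mem := by
    refine hinv.sameExcept hunv hsv ?_
    intro w hw
    have ew := List.mem_singleton.mp hw
    rw [ew]
    left
    left
    rw [hbase]
    simp only
    omega
  have hok1 : GifOK Hc (DGifOpen.fresh gif pv) R s.mem := hok.sameExcept hinv.heap ⟨hcur.1, hcur.2.1⟩ hsv hloose
  have hrem1 : rem R s.mem = rem R v.mem := by
    apply rem_sameExcept hsv (by omega)
    intro w hw
    have ew := List.mem_singleton.mp hw
    rw [ew]
    simp only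
    omega
  exact {
    core := {
      entry := hcore.entry
      pre := hcore.pre
      rip := hrip
      rsp := hrsp
      r12 := e12.trans hcore.r12
      slot_r15 := hs15
      slot_r14 := hs14
      slot_r13 := hs13
      slot_r12 := hs12
      slot_rbp := hsbp
      slot_rbx := hsbx
      slot_ra := hsra
      rem := by
        rw [hrem1]
        exact hcore.rem
      same := hsame1
      code := hcodeIn
      abi := habi
    }
    r13 := e13.trans c_r13
    rbx := by
      rw [ebx]
      exact hrbx
    rbp := by
      rw [ebp]
      exact hrbp
    region := hregion
    inv := hinv1
    ok := hok1
  }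

/-- **1087B9H … the call of strncmp … 1087D2H (ret14)** (dgif_lib.c:217-218): `Buf[6] = 0` (a store into the own frame),
`strncmp("GIFVER", Buf, 3)`: the literal is a registered global, `Buf` the frame's object. Nothing but stack is written. -/
theorem d4_seg_strncmp (Lay : Layout) (hLay : Lay.hi = 0x1000000) (μ : Microarch) (hμ : UserX.MicroOK μ) (u₀ : State)
    (hcode : HasCodeNat Lay u₀ Gif.L.DGifOpen.entry Gif.Code.code_DGifOpen.nat Gif.L.DGifOpen.size)
    (H : Heap) (rest : List Obj) (frames : List (Nat × FrameLayout)) (R : Rd) (Hc : Heap) (gif pv : Nat) (e : State) (ret : Word)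
    (h_strncmp : Calls Lay μ ProgX.Base.WayInv (ProgX.Base.conv u₀) Gif.L.strncmp.entry
      (Gif.Spec.strncmp.spec (Hc.liveObjs ++ rest) (DGifOpen.framesIn frames e)))
    (v : State) (hat : DGifOpen.Opened Gif.L.DGifOpen.at_1087b9 H rest frames R Hc gif pv u₀ e ret v) :
    ReachVia Lay μ ProgX.Base.WayInv v (DGifOpen.Opened Gif.L.DGifOpen.ret14 H rest frames R Hc gif pv u₀ e ret) := by
  obtain ⟨hcore, c_r13, hrbx, hrbp, hregion, hinv, hok⟩ := hat
  have he := hcore.entry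
  v_entry he
  obtain ⟨hpre, hctx, hcur0, hconsts0, hrdi, hrsi, herr⟩ := hcore.pre
  have w_rip := hcore.rip
  have c_rsp : v.reg .rsp = e.reg .rsp - 120 := hcore.rsp
  have w_kept : RegsKept [.rsp] v v := RegsKept.refl _ _
  have w_eq : Mem.EqOn ProgX.Base.L.textLo ProgX.Base.L.textHi u₀.mem v.mem := ProgX.Base.conv_code_eqOn hcore.code
  have hdf := (show abiInv _ from hcore.abi).1
  have hmx := (show abiInv _ from hcore.abi).2
  have hsse := ProgX.Base.sseOK_of_abiInv hcore.abi
  have k_r15 : v.mem.readLE (e.reg .rsp - 8) 8 = (e.reg .r15).toNat := hcore.slot_r15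
  have k_r14 : v.mem.readLE (e.reg .rsp - 16) 8 = (e.reg .r14).toNat := hcore.slot_r14
  have k_r13 : v.mem.readLE (e.reg .rsp - 24) 8 = (e.reg .r13).toNat := hcore.slot_r13
  have k_r12 : v.mem.readLE (e.reg .rsp - 32) 8 = (e.reg .r12).toNat := hcore.slot_r12
  have k_rbp : v.mem.readLE (e.reg .rsp - 40) 8 = (e.reg .rbp).toNat := hcore.slot_rbp
  have k_rbx : v.mem.readLE (e.reg .rsp - 48) 8 = (e.reg .rbx).toNat := hcore.slot_rbx
  have k_ra : UInt64.ofNat (v.mem.readLE (e.reg .rsp) 8) = ret := hcore.slot_ra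
  have hsame : Mem.SameExcept
    [⟨(e.reg .rsp).toNat - 528, (e.reg .rsp).toNat⟩,
     shadowSpan ((e.reg .rsp).toNat - 120) ((e.reg .rsp).toNat - 56),
     ⟨0x800000, 0x1000020⟩,
     ⟨(e.reg .rdx).toNat, (e.reg .rdx).toNat + 4⟩,
     ⟨R.cur, R.cur + 8⟩] e.mem v.mem := hcore.same
  have hcur := hctx.cursor_range hpre.inv.shadow
  u_walk hcode [hμ.vendor] until [Gif.L.DGifOpen.ret14] span [ProgX.Base.L.textLo, ProgX.Base.L.textHi] side (v_side)
  case call_inv =>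
    v_inv
  case pre_1087cd =>
    -- STRNCMP'S PRECONDITION: the heap's precondition for the present heap, under the own frame: only stack was written since `v`
    have hun : ShadowUntouched v.mem s_1087cd.mem := by v_untouched
    have hs : Mem.SameExcept [⟨(e.reg .rsp).toNat - 528, (e.reg .rsp).toNat⟩,
        ⟨(e.reg .rdx).toNat, (e.reg .rdx).toNat + 4⟩] v.mem s_1087cd.mem := by
      rw [w_mem]
      u_same
    have hhp : HeapPre Hc rest (DGifOpen.framesIn frames e) s_1087cd :=
      d4_heapPre hpre hregion hinv hun hs (d4_err_range herr hcur.1 hpre.inv).1 he_top (by rw [w_rsp]; u_omega)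
    -- the literal "GIFVER" is a registered global
    have hlit : LiveIn (Hc.liveObjs ++ rest) (DGifOpen.framesIn frames e) 0x141240 3 :=
      ProgX.LiveIn.of_other (o := Gif.Globals.LC7.obj) (List.mem_append_right _ hctx.stamp) (by decide) (by decide)
    -- `Buf` is the object of the own frame (`[rsp + 0x20]` = base + 32, 7 bytes)
    have ho : (⟨(e.reg .rsp).toNat - 120 + 32, 7, .stack⟩ : Obj) ∈
        Gif.Frames.DGifOpen.objsAt ((e.reg .rsp).toNat - 120) := List.mem_cons_self
    have hbuf : LiveIn (Hc.liveObjs ++ rest) (DGifOpen.framesIn frames e) ((e.reg .rsp).toNat - 88) 3 :=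
      LiveIn.own _ ho (by omega) (by omega)
    refine ⟨hhp.shadowPre, Or.inr ⟨?_, ?_⟩⟩
    · rw [w_rdi, w_rdx]
      exact hlit
    · rw [w_rsi, w_rdx]
      have e88 : (e.reg .rsp - 88).toNat = (e.reg .rsp).toNat - 88 := by u_omega
      rw [e88]
      exact hbuf
  -- 0x1087d2 (ret14): STRNCMP HAS RETURNED. It wrote nothing but its stack frame
  v_after_call w_rsp_1087cd w_mem_1087cd
  -- the slots and the return address, over the two stores (first step) and through strncmp's footprint (second step)
  have hp15 : s_1087cd.mem.readLE (e.reg .rsp - 8) 8 = (e.reg .r15).toNat := by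
    rw [w_mem_1087cd]
    u_frame k_r15
  rw [w_mem_1087cd] at hp15
  have hs15 : s_1087cdr.mem.readLE (e.reg .rsp - 8) 8 = (e.reg .r15).toNat := by u_frame hp15
  have hp14 : s_1087cd.mem.readLE (e.reg .rsp - 16) 8 = (e.reg .r14).toNat := by
    rw [w_mem_1087cd]
    u_frame k_r14
  rw [w_mem_1087cd] at hp14
  have hs14 : s_1087cdr.mem.readLE (e.reg .rsp - 16) 8 = (e.reg .r14).toNat := by u_frame hp14
  have hp13 : s_1087cd.mem.readLE (e.reg .rsp - 24) 8 = (e.reg .r13).toNat := by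
    rw [w_mem_1087cd]
    u_frame k_r13
  rw [w_mem_1087cd] at hp13
  have hs13 : s_1087cdr.mem.readLE (e.reg .rsp - 24) 8 = (e.reg .r13).toNat := by u_frame hp13
  have hp12 : s_1087cd.mem.readLE (e.reg .rsp - 32) 8 = (e.reg .r12).toNat := by
    rw [w_mem_1087cd]
    u_frame k_r12
  rw [w_mem_1087cd] at hp12
  have hs12 : s_1087cdr.mem.readLE (e.reg .rsp - 32) 8 = (e.reg .r12).toNat := by u_frame hp12
  have hpbp : s_1087cd.mem.readLE (e.reg .rsp - 40) 8 = (e.reg .rbp).toNat := by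
    rw [w_mem_1087cd]
    u_frame k_rbp
  rw [w_mem_1087cd] at hpbp
  have hsbp : s_1087cdr.mem.readLE (e.reg .rsp - 40) 8 = (e.reg .rbp).toNat := by u_frame hpbp
  have hpbx : s_1087cd.mem.readLE (e.reg .rsp - 48) 8 = (e.reg .rbx).toNat := by
    rw [w_mem_1087cd]
    u_frame k_rbx
  rw [w_mem_1087cd] at hpbx
  have hsbx : s_1087cdr.mem.readLE (e.reg .rsp - 48) 8 = (e.reg .rbx).toNat := by u_frame hpbx
  have hpra : UInt64.ofNat (s_1087cd.mem.readLE (e.reg .rsp) 8) = ret := by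
    rw [w_mem_1087cd]
    u_frame k_ra
  rw [w_mem_1087cd] at hpra
  have hsra : UInt64.ofNat (s_1087cdr.mem.readLE (e.reg .rsp) 8) = ret := by u_frame hpra
  -- what was written since `v`: the function's stack only
  have hsv : Mem.SameExcept [⟨(e.reg .rsp).toNat - 528, (e.reg .rsp).toNat⟩] v.mem s_1087cdr.mem := by u_same
  have hunv : ShadowUntouched v.mem s_1087cdr.mem := by v_untouched
  -- the footprint since the entry
  have hsame1 : Mem.SameExcept
    [⟨(e.reg .rsp).toNat - 528, (e.reg .rsp).toNat⟩,
     shadowSpan ((e.reg .rsp).toNat - 120) ((e.reg .rsp).toNat - 56),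
     ⟨0x800000, 0x1000020⟩,
     ⟨(e.reg .rdx).toNat, (e.reg .rdx).toNat + 4⟩,
     ⟨R.cur, R.cur + 8⟩] e.mem s_1087cdr.mem := by u_same
  exact ReachVia.done (d4_opened_stack hcore hregion hinv hok hctx hpre he_top he_room w_rip w_rsp
    (w_kept.get .r12 rfl) (w_kept.get .r13 rfl) (w_kept.get .rbx rfl) (w_kept.get .rbp rfl) c_r13 hrbx hrbp
    hs15 hs14 hs13 hs12 hsbp hsbx hsra hsv hunv hsame1 w_code w_inv)

/-- **At 1088B9H (ret25), `free(pv)` has returned on the error way** (dgif_lib.c:222): `Core`; `rbx = gif`, still live in the heap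
`Hc.release pv`, whose invariant holds; the cursor and the constants as they were. -/
structure d4_AtRet25 (H : Heap) (rest : List Obj) (frames : List (Nat × FrameLayout)) (R : Rd) (Hc : Heap) (gif pv : Nat)
    (u₀ e : State) (ret : Word) (v : State) : Prop where
  core : DGifOpen.Core Gif.L.DGifOpen.ret25 H rest frames R u₀ e ret v
  rbx : (v.reg .rbx).toNat = gif
  region : SameRegion H Hc
  inv : HeapInv (Hc.release pv) rest (DGifOpen.framesIn frames e) ((e.reg .rsp).toNat - 120) v.mem
  live : (Hc.release pv).Live gif 120
  cursor : CursorOK R v.mem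
  consts : Consts v.mem

/-- **The assertion at ret25 from what the walk knows there**: the state `s` has `rbx`, `r12` of `v`, the slots and the return
address are given, its memory differs from `v`'s in the function's stack, `*Error`, the state word of pv's header and pv's
shadow; the heap's invariant for `Hc.release pv` is `free`'s post. gif stays live (it is another object of the forest); the
cursor, the constants and the reader's measure are off every window written. -/
theorem d4_atRet25_of {cut : Word} {H : Heap} {rest : List Obj} {frames : List (Nat × FrameLayout)} {R : Rd} {Hc : Heap}
    {gif pv : Nat} {u₀ e : State} {ret : Word} {v s : State} {p top : Nat}
    (hcore : DGifOpen.Core cut H rest frames R u₀ e ret v) (hregion : SameRegion H Hc)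
    (hinv : HeapInv Hc rest (DGifOpen.framesIn frames e) ((e.reg .rsp).toNat - 120) v.mem)
    (hok : GifOK Hc (DGifOpen.fresh gif pv) R v.mem)
    (hctx : Ctx rest frames R) (hpre : HeapPre H rest frames e)
    (herr : p + 4 ≤ 0x800000 ∧ (p + 4 ≤ R.cur ∨ R.cur + 16 ≤ p) ∧ (p = 0 ∨ (0x700000 ≤ p ∧ top ≤ p)))
    (hroom : 0x700000 + 528 ≤ (e.reg .rsp).toNat)
    (hrip : s.rip = Gif.L.DGifOpen.ret25) (hrsp : s.reg .rsp = e.reg .rsp - 120)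
    (e12 : s.reg .r12 = v.reg .r12) (ebx : s.reg .rbx = v.reg .rbx)
    (hrbx : (v.reg .rbx).toNat = gif)
    (hs15 : s.mem.readLE (e.reg .rsp - 8) 8 = (e.reg .r15).toNat)
    (hs14 : s.mem.readLE (e.reg .rsp - 16) 8 = (e.reg .r14).toNat)
    (hs13 : s.mem.readLE (e.reg .rsp - 24) 8 = (e.reg .r13).toNat)
    (hs12 : s.mem.readLE (e.reg .rsp - 32) 8 = (e.reg .r12).toNat)
    (hsbp : s.mem.readLE (e.reg .rsp - 40) 8 = (e.reg .rbp).toNat)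
    (hsbx : s.mem.readLE (e.reg .rsp - 48) 8 = (e.reg .rbx).toNat)
    (hsra : UInt64.ofNat (s.mem.readLE (e.reg .rsp) 8) = ret)
    (hsv : Mem.SameExcept
      [⟨(e.reg .rsp).toNat - 528, (e.reg .rsp).toNat⟩,
       ⟨p, p + 4⟩,
       ⟨pv - 24, pv - 16⟩,
       ⟨0xC00000 + pv / 8, 0xC00000 + (pv + 24936 + 7) / 8⟩] v.mem s.mem)
    (hsame1 : Mem.SameExcept
      [⟨(e.reg .rsp).toNat - 528, (e.reg .rsp).toNat⟩,
       shadowSpan ((e.reg .rsp).toNat - 120) ((e.reg .rsp).toNat - 56),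
       ⟨0x800000, 0x1000020⟩,
       ⟨(e.reg .rdx).toNat, (e.reg .rdx).toNat + 4⟩,
       ⟨R.cur, R.cur + 8⟩] e.mem s.mem)
    (hinv1 : HeapInv (Hc.release pv) rest (DGifOpen.framesIn frames e) ((e.reg .rsp).toNat - 120) s.mem)
    (hcodeIn : (conv u₀).code.In s.mem) (habi : (conv u₀).inv s) :
    d4_AtRet25 H rest frames R Hc gif pv u₀ e ret s := by
  have hcur := hctx.cursor_range hpre.inv.shadow
  have hbase : Hc.base = 0x800000 := by
    rw [hregion.1]
    exact hpre.base
  -- where pv is: in the heap's region, above the stack and the cursor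
  have hpin := (hok.owns.inside hinv.heap (o := (pv, 24936)) (List.mem_cons_of_mem _ List.mem_cons_self)).1
  simp only at hpin
  rw [hbase] at hpin
  -- every window written misses the cursor …
  have hoffc : ∀ w, w ∈ [(⟨(e.reg .rsp).toNat - 528, (e.reg .rsp).toNat⟩ : Span), ⟨p, p + 4⟩, ⟨pv - 24, pv - 16⟩,
      ⟨0xC00000 + pv / 8, 0xC00000 + (pv + 24936 + 7) / 8⟩] → w.hi ≤ R.cur ∨ R.cur + 16 ≤ w.lo := by
    intro w hw
    simp only [List.mem_cons, List.not_mem_nil, or_false] at hw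
    rcases hw with ew | ew | ew | ew
    · rw [ew]
      simp only
      omega
    · rw [ew]
      simp only
      omega
    · rw [ew]
      simp only
      omega
    · rw [ew]
      simp only
      omega
  -- … and the constants
  have hoffk : ∀ w, w ∈ [(⟨(e.reg .rsp).toNat - 528, (e.reg .rsp).toNat⟩ : Span), ⟨p, p + 4⟩, ⟨pv - 24, pv - 16⟩,
      ⟨0xC00000 + pv / 8, 0xC00000 + (pv + 24936 + 7) / 8⟩] → w.hi ≤ 0x141300 ∨ 0x14139a ≤ w.lo := by
    intro w hw
    simp only [List.mem_cons, List.not_mem_nil, or_false] at hw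
    rcases hw with ew | ew | ew | ew
    · rw [ew]
      simp only
      omega
    · rw [ew]
      simp only
      rcases herr.2.2 with h1 | h2
      · omega
      · omega
    · rw [ew]
      simp only
      omega
    · rw [ew]
      simp only
      omega
  have hrem1 : rem R s.mem = rem R v.mem := rem_sameExcept hsv (by omega) hoffc
  -- gif and pv are different objects of the forest
  have hne : gif ≠ pv := by
    have hap := hok.owns.apart
    have h1 := (List.pairwise_cons.mp hap).1 (pv, 24936) List.mem_cons_self
    exact h1
  exact {
    core := {
      entry := hcore.entry
      pre := hcore.pre
      rip := hrip
      rsp := hrsp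
      r12 := e12.trans hcore.r12
      slot_r15 := hs15
      slot_r14 := hs14
      slot_r13 := hs13
      slot_r12 := hs12
      slot_rbp := hsbp
      slot_rbx := hsbx
      slot_ra := hsra
      rem := by
        rw [hrem1]
        exact hcore.rem
      same := hsame1
      code := hcodeIn
      abi := habi
    }
    rbx := by
      rw [ebx]
      exact hrbx
    region := hregion
    inv := hinv1
    live := hok.gif_live.release_ne hne
    cursor := hok.shape.cursor.sameExcept hsv (by omega) hoffc
    consts := hok.shape.consts.sameExcept hsv hoffk
  }

/-- **1087D2H (ret14) … 1087DAH, or … 10889CH … the call of `free(pv)` … 1088B9H (ret25)** (dgif_lib.c:218-222): `test eax, eax`;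
equal: on to the cut 1087DAH; different: `*Error = 103` if `Error` is not NULL (the checked store), then `free(Private)`. -/
theorem d4_seg_branch (Lay : Layout) (hLay : Lay.hi = 0x1000000) (μ : Microarch) (hμ : UserX.MicroOK μ) (u₀ : State)
    (hcode : HasCodeNat Lay u₀ Gif.L.DGifOpen.entry Gif.Code.code_DGifOpen.nat Gif.L.DGifOpen.size)
    (H : Heap) (rest : List Obj) (frames : List (Nat × FrameLayout)) (R : Rd) (Hc : Heap) (gif pv : Nat) (e : State) (ret : Word)
    (h_free : Calls Lay μ ProgX.Base.WayInv (ProgX.Base.conv u₀) ProgX.Base.L.free.entry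
      (ProgX.Base.Spec.free.spec Hc rest (DGifOpen.framesIn frames e) 24936))
    (h_asan_store4_noabort : Asan.SmallCheck Lay μ ProgX.Base.WayInv (ProgX.Base.CodeOK u₀) [.rax, .rcx, .rdx] 4
      ProgX.Base.L.__asan_store4_noabort.entry)
    (v : State) (hat : DGifOpen.Opened Gif.L.DGifOpen.ret14 H rest frames R Hc gif pv u₀ e ret v) :
    ReachVia Lay μ ProgX.Base.WayInv v (fun w =>
      DGifOpen.Opened Gif.L.DGifOpen.at_1087da H rest frames R Hc gif pv u₀ e ret w ∨
      d4_AtRet25 H rest frames R Hc gif pv u₀ e ret w) := by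
  obtain ⟨hcore, c_r13, hrbx, hrbp, hregion, hinv, hok⟩ := hat
  have he := hcore.entry
  v_entry he
  obtain ⟨hpre, hctx, hcur0, hconsts0, hrdi, hrsi, herr⟩ := hcore.pre
  have w_rip := hcore.rip
  have c_rsp : v.reg .rsp = e.reg .rsp - 120 := hcore.rsp
  obtain ⟨z, c_rax⟩ : ∃ z, v.reg .rax = z := ⟨_, rfl⟩
  have w_kept : RegsKept [.rsp] v v := RegsKept.refl _ _
  have w_eq : Mem.EqOn ProgX.Base.L.textLo ProgX.Base.L.textHi u₀.mem v.mem := ProgX.Base.conv_code_eqOn hcore.code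
  have hdf := (show abiInv _ from hcore.abi).1
  have hmx := (show abiInv _ from hcore.abi).2
  have hsse := ProgX.Base.sseOK_of_abiInv hcore.abi
  have k_r15 : v.mem.readLE (e.reg .rsp - 8) 8 = (e.reg .r15).toNat := hcore.slot_r15
  have k_r14 : v.mem.readLE (e.reg .rsp - 16) 8 = (e.reg .r14).toNat := hcore.slot_r14
  have k_r13 : v.mem.readLE (e.reg .rsp - 24) 8 = (e.reg .r13).toNat := hcore.slot_r13
  have k_r12 : v.mem.readLE (e.reg .rsp - 32) 8 = (e.reg .r12).toNat := hcore.slot_r12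
  have k_rbp : v.mem.readLE (e.reg .rsp - 40) 8 = (e.reg .rbp).toNat := hcore.slot_rbp
  have k_rbx : v.mem.readLE (e.reg .rsp - 48) 8 = (e.reg .rbx).toNat := hcore.slot_rbx
  have k_ra : UInt64.ofNat (v.mem.readLE (e.reg .rsp) 8) = ret := hcore.slot_ra
  have hsame : Mem.SameExcept
    [⟨(e.reg .rsp).toNat - 528, (e.reg .rsp).toNat⟩,
     shadowSpan ((e.reg .rsp).toNat - 120) ((e.reg .rsp).toNat - 56),
     ⟨0x800000, 0x1000020⟩,
     ⟨(e.reg .rdx).toNat, (e.reg .rdx).toNat + 4⟩,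
     ⟨R.cur, R.cur + 8⟩] e.mem v.mem := hcore.same
  have hcur := hctx.cursor_range hpre.inv.shadow
  -- where `*Error` and pv are, as numbers
  have herange := d4_err_range herr hcur.1 hpre.inv
  have hbase : Hc.base = 0x800000 := by
    rw [hregion.1]
    exact hpre.base
  have hpin0 := hok.owns.inside hinv.heap (o := (pv, 24936)) (List.mem_cons_of_mem _ List.mem_cons_self)
  simp only at hpin0
  rw [hbase] at hpin0
  have hpv1 : 0x800040 ≤ pv := hpin0.1
  have hpv2 : pv + 24936 + 32 ≤ 0xC00000 := hpin0.2.2.2.2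
  clear hpin0
  -- THE WALK: to the cut 1087DAH, or over the error exit to the return of `free(pv)`
  u_walk hcode [hμ.vendor] until [Gif.L.DGifOpen.at_1087da, Gif.L.DGifOpen.ret25] span [ProgX.Base.L.textLo, ProgX.Base.L.textHi] side (v_side)
  case call_inv =>
    -- (Error = NULL)
    v_inv
  case pre_1088b4 =>
    -- 0x1088b4 (Error = NULL): `free(Private)`: the heap's precondition for the present heap; pv is live
    have hun : ShadowUntouched v.mem s_1088b4.mem := by v_untouched
    have hs : Mem.SameExcept [⟨(e.reg .rsp).toNat - 528, (e.reg .rsp).toNat⟩,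
        ⟨(e.reg .rdx).toNat, (e.reg .rdx).toNat + 4⟩] v.mem s_1088b4.mem := by
      rw [w_mem]
      u_same
    refine ⟨d4_heapPre hpre hregion hinv hun hs herange.1 he_top (by rw [w_rsp]; u_omega), Or.inr ?_⟩
    rw [w_rdi, hrbp]
    exact hok.pv_live
  case check_1088a4 =>
    -- 0x1088a4 (dgif_lib.c:220) the store of `*Error`: 4 bytes of a stack object of a caller's frame
    have hun : ShadowUntouched v.mem s_1088a4.mem := by v_untouched
    have hl : LiveIn (Hc.liveObjs ++ rest) (DGifOpen.framesIn frames e) (e.reg .rdx).toNat 4 :=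
      DGifOpen.errLive herr hbr_10889f hpre.inv Hc _
    exact hl.accSmall hinv.shadow hun _ 4 (by decide) (by u_omega) (by u_omega)
  case call_inv =>
    -- (Error ≠ NULL)
    v_inv
  case pre_1088b4 =>
    -- 0x1088b4 (Error ≠ NULL): `free(Private)`: the heap's precondition for the present heap; pv is live
    have hun : ShadowUntouched v.mem s_1088b4.mem := by v_untouched
    have hs : Mem.SameExcept [⟨(e.reg .rsp).toNat - 528, (e.reg .rsp).toNat⟩,
        ⟨(e.reg .rdx).toNat, (e.reg .rdx).toNat + 4⟩] v.mem s_1088b4.mem := by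
      rw [w_mem]
      u_same
    refine ⟨d4_heapPre hpre hregion hinv hun hs herange.1 he_top (by rw [w_rsp]; u_omega), Or.inr ?_⟩
    rw [w_rdi, hrbp]
    exact hok.pv_live
  · -- 0x1088b9 (ret25) (Error = NULL): `free(pv)` HAS RETURNED: the heap is `Hc.release pv`
    have hne : (s_1088b4.reg .rdi).toNat ≠ 0 := by
      rw [w_rdi_1088b4, hrbp]
      omega
    have hinv1 := w_post.2 hne
    rw [w_rdi_1088b4, hrbp] at hinv1
    clear w_post
    have e8 : (s_1088b4.reg .rsp).toNat + 8 = (e.reg .rsp).toNat - 120 := by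
      rw [w_rsp_1088b4]
      u_omega
    rw [e8] at hinv1
    v_after_call w_rsp_1088b4 w_mem_1088b4
    simp only [shadowSpan, w_rdi_1088b4, hrbp] at w_same
    -- the slots and the return address, over the stores since `v` (first step) and through `free`'s footprint (second step)
    have hp15 : s_1088b4.mem.readLE (e.reg .rsp - 8) 8 = (e.reg .r15).toNat := by
      rw [w_mem_1088b4]
      u_frame k_r15
    rw [w_mem_1088b4] at hp15
    have hs15 : s_1088b4r.mem.readLE (e.reg .rsp - 8) 8 = (e.reg .r15).toNat := by u_frame hp15
    have hp14 : s_1088b4.mem.readLE (e.reg .rsp - 16) 8 = (e.reg .r14).toNat := by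
      rw [w_mem_1088b4]
      u_frame k_r14
    rw [w_mem_1088b4] at hp14
    have hs14 : s_1088b4r.mem.readLE (e.reg .rsp - 16) 8 = (e.reg .r14).toNat := by u_frame hp14
    have hp13 : s_1088b4.mem.readLE (e.reg .rsp - 24) 8 = (e.reg .r13).toNat := by
      rw [w_mem_1088b4]
      u_frame k_r13
    rw [w_mem_1088b4] at hp13
    have hs13 : s_1088b4r.mem.readLE (e.reg .rsp - 24) 8 = (e.reg .r13).toNat := by u_frame hp13
    have hp12 : s_1088b4.mem.readLE (e.reg .rsp - 32) 8 = (e.reg .r12).toNat := by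
      rw [w_mem_1088b4]
      u_frame k_r12
    rw [w_mem_1088b4] at hp12
    have hs12 : s_1088b4r.mem.readLE (e.reg .rsp - 32) 8 = (e.reg .r12).toNat := by u_frame hp12
    have hpbp : s_1088b4.mem.readLE (e.reg .rsp - 40) 8 = (e.reg .rbp).toNat := by
      rw [w_mem_1088b4]
      u_frame k_rbp
    rw [w_mem_1088b4] at hpbp
    have hsbp : s_1088b4r.mem.readLE (e.reg .rsp - 40) 8 = (e.reg .rbp).toNat := by u_frame hpbp
    have hpbx : s_1088b4.mem.readLE (e.reg .rsp - 48) 8 = (e.reg .rbx).toNat := by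
      rw [w_mem_1088b4]
      u_frame k_rbx
    rw [w_mem_1088b4] at hpbx
    have hsbx : s_1088b4r.mem.readLE (e.reg .rsp - 48) 8 = (e.reg .rbx).toNat := by u_frame hpbx
    have hpra : UInt64.ofNat (s_1088b4.mem.readLE (e.reg .rsp) 8) = ret := by
      rw [w_mem_1088b4]
      u_frame k_ra
    rw [w_mem_1088b4] at hpra
    have hsra : UInt64.ofNat (s_1088b4r.mem.readLE (e.reg .rsp) 8) = ret := by u_frame hpra
    -- what was written since `v`, and since the entry
    have hsv : Mem.SameExcept
      [⟨(e.reg .rsp).toNat - 528, (e.reg .rsp).toNat⟩,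
       ⟨(e.reg .rdx).toNat, (e.reg .rdx).toNat + 4⟩,
       ⟨pv - 24, pv - 16⟩,
       ⟨0xC00000 + pv / 8, 0xC00000 + (pv + 24936 + 7) / 8⟩] v.mem s_1088b4r.mem := by u_same
    have hsame1 : Mem.SameExcept
      [⟨(e.reg .rsp).toNat - 528, (e.reg .rsp).toNat⟩,
       shadowSpan ((e.reg .rsp).toNat - 120) ((e.reg .rsp).toNat - 56),
       ⟨0x800000, 0x1000020⟩,
       ⟨(e.reg .rdx).toNat, (e.reg .rdx).toNat + 4⟩,
       ⟨R.cur, R.cur + 8⟩] e.mem s_1088b4r.mem := by u_same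
    exact ReachVia.done (Or.inr (d4_atRet25_of hcore hregion hinv hok hctx hpre herange he_room w_rip w_rsp
      (w_kept.get .r12 rfl) (w_kept.get .rbx rfl) hrbx hs15 hs14 hs13 hs12 hsbp hsbx hsra hsv hsame1 hinv1 w_code w_inv))
  · -- 0x1088b9 (ret25) (Error ≠ NULL): `free(pv)` HAS RETURNED: the heap is `Hc.release pv`
    have hne : (s_1088b4.reg .rdi).toNat ≠ 0 := by
      rw [w_rdi_1088b4, hrbp]
      omega
    have hinv1 := w_post.2 hne
    rw [w_rdi_1088b4, hrbp] at hinv1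
    clear w_post
    have e8 : (s_1088b4.reg .rsp).toNat + 8 = (e.reg .rsp).toNat - 120 := by
      rw [w_rsp_1088b4]
      u_omega
    rw [e8] at hinv1
    v_after_call w_rsp_1088b4 w_mem_1088b4
    simp only [shadowSpan, w_rdi_1088b4, hrbp] at w_same
    -- the slots and the return address, over the stores since `v` (first step) and through `free`'s footprint (second step)
    have hp15 : s_1088b4.mem.readLE (e.reg .rsp - 8) 8 = (e.reg .r15).toNat := by
      rw [w_mem_1088b4]
      u_frame k_r15
    rw [w_mem_1088b4] at hp15
    have hs15 : s_1088b4r.mem.readLE (e.reg .rsp - 8) 8 = (e.reg .r15).toNat := by u_frame hp15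
    have hp14 : s_1088b4.mem.readLE (e.reg .rsp - 16) 8 = (e.reg .r14).toNat := by
      rw [w_mem_1088b4]
      u_frame k_r14
    rw [w_mem_1088b4] at hp14
    have hs14 : s_1088b4r.mem.readLE (e.reg .rsp - 16) 8 = (e.reg .r14).toNat := by u_frame hp14
    have hp13 : s_1088b4.mem.readLE (e.reg .rsp - 24) 8 = (e.reg .r13).toNat := by
      rw [w_mem_1088b4]
      u_frame k_r13
    rw [w_mem_1088b4] at hp13
    have hs13 : s_1088b4r.mem.readLE (e.reg .rsp - 24) 8 = (e.reg .r13).toNat := by u_frame hp13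
    have hp12 : s_1088b4.mem.readLE (e.reg .rsp - 32) 8 = (e.reg .r12).toNat := by
      rw [w_mem_1088b4]
      u_frame k_r12
    rw [w_mem_1088b4] at hp12
    have hs12 : s_1088b4r.mem.readLE (e.reg .rsp - 32) 8 = (e.reg .r12).toNat := by u_frame hp12
    have hpbp : s_1088b4.mem.readLE (e.reg .rsp - 40) 8 = (e.reg .rbp).toNat := by
      rw [w_mem_1088b4]
      u_frame k_rbp
    rw [w_mem_1088b4] at hpbp
    have hsbp : s_1088b4r.mem.readLE (e.reg .rsp - 40) 8 = (e.reg .rbp).toNat := by u_frame hpbp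
    have hpbx : s_1088b4.mem.readLE (e.reg .rsp - 48) 8 = (e.reg .rbx).toNat := by
      rw [w_mem_1088b4]
      u_frame k_rbx
    rw [w_mem_1088b4] at hpbx
    have hsbx : s_1088b4r.mem.readLE (e.reg .rsp - 48) 8 = (e.reg .rbx).toNat := by u_frame hpbx
    have hpra : UInt64.ofNat (s_1088b4.mem.readLE (e.reg .rsp) 8) = ret := by
      rw [w_mem_1088b4]
      u_frame k_ra
    rw [w_mem_1088b4] at hpra
    have hsra : UInt64.ofNat (s_1088b4r.mem.readLE (e.reg .rsp) 8) = ret := by u_frame hpra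
    -- what was written since `v`, and since the entry
    have hsv : Mem.SameExcept
      [⟨(e.reg .rsp).toNat - 528, (e.reg .rsp).toNat⟩,
       ⟨(e.reg .rdx).toNat, (e.reg .rdx).toNat + 4⟩,
       ⟨pv - 24, pv - 16⟩,
       ⟨0xC00000 + pv / 8, 0xC00000 + (pv + 24936 + 7) / 8⟩] v.mem s_1088b4r.mem := by u_same
    have hsame1 : Mem.SameExcept
      [⟨(e.reg .rsp).toNat - 528, (e.reg .rsp).toNat⟩,
       shadowSpan ((e.reg .rsp).toNat - 120) ((e.reg .rsp).toNat - 56),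
       ⟨0x800000, 0x1000020⟩,
       ⟨(e.reg .rdx).toNat, (e.reg .rdx).toNat + 4⟩,
       ⟨R.cur, R.cur + 8⟩] e.mem s_1088b4r.mem := by u_same
    exact ReachVia.done (Or.inr (d4_atRet25_of hcore hregion hinv hok hctx hpre herange he_room w_rip w_rsp
      (w_kept.get .r12 rfl) (w_kept.get .rbx rfl) hrbx hs15 hs14 hs13 hs12 hsbp hsbx hsra hsv hsame1 hinv1 w_code w_inv))
  · -- 0x1087da: the stamp is "GIF": on with `Opened` (nothing was written)
    have hsv : Mem.SameExcept [⟨(e.reg .rsp).toNat - 528, (e.reg .rsp).toNat⟩] v.mem s_1087d4.mem := by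
      rw [w_mem]
      u_same
    have hunv : ShadowUntouched v.mem s_1087d4.mem := by v_untouched
    have habi : (conv u₀).inv s_1087d4 := by
      refine ProgX.Base.abiInv_of ?_ ?_
      · rw [w_flags]
        simp only [X86.User.df_setStatus]
        exact hdf
      · rw [w_mxcsr]
        exact hmx
    rw [← w_mem] at k_r15 k_r14 k_r13 k_r12 k_rbp k_rbx k_ra hsame
    exact ReachVia.done (Or.inl (d4_opened_stack hcore hregion hinv hok hctx hpre he_top he_room w_rip w_rsp
      (w_kept.get .r12 rfl) (w_kept.get .r13 rfl) (w_kept.get .rbx rfl) (w_kept.get .rbp rfl) c_r13 hrbx hrbp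
      k_r15 k_r14 k_r13 k_r12 k_rbp k_rbx k_ra hsv hunv hsame (ProgX.Base.conv_code_in w_eq) habi))

/-- **Where a live object of a heap at 800000H lies**: in the heap's region, above the stack. -/
theorem d4_live_range {H : Heap} {mem : Mem} {p n : Nat} (hok : HeapOK H mem) (hbase : H.base = 0x800000) (hl : H.Live p n) :
    0x800040 ≤ p ∧ p + n + 32 ≤ 0xC00000 := by
  obtain ⟨c, hlc⟩ := hl
  have h1 := hok.obj_range hlc
  have h2 := hok.obj_inside hlc
  simp only at h1 h2
  omega

/-- **At 1088C1H (ret26), `free(gif)` has returned on the error way** (dgif_lib.c:223): `Core`; the heap's invariant for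
`(Hc.release pv).release gif`; the cursor and the constants as they were. -/
structure d4_AtRet26 (H : Heap) (rest : List Obj) (frames : List (Nat × FrameLayout)) (R : Rd) (Hc : Heap) (gif pv : Nat)
    (u₀ e : State) (ret : Word) (v : State) : Prop where
  core : DGifOpen.Core Gif.L.DGifOpen.ret26 H rest frames R u₀ e ret v
  region : SameRegion H Hc
  inv : HeapInv ((Hc.release pv).release gif) rest (DGifOpen.framesIn frames e) ((e.reg .rsp).toNat - 120) v.mem
  cursor : CursorOK R v.mem
  consts : Consts v.mem

/-- **The assertion at ret26 from what the walk knows there**: the memory of `s` differs from `v`'s in the function's stack,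
the state word of gif's header and gif's shadow: all off the cursor and the constants. -/
theorem d4_atRet26_of {H : Heap} {rest : List Obj} {frames : List (Nat × FrameLayout)} {R : Rd} {Hc : Heap}
    {gif pv : Nat} {u₀ e : State} {ret : Word} {v s : State}
    (hat : d4_AtRet25 H rest frames R Hc gif pv u₀ e ret v)
    (hctx : Ctx rest frames R) (hpre : HeapPre H rest frames e)
    (hroom : 0x700000 + 528 ≤ (e.reg .rsp).toNat)
    (hrip : s.rip = Gif.L.DGifOpen.ret26) (hrsp : s.reg .rsp = e.reg .rsp - 120)
    (e12 : s.reg .r12 = v.reg .r12)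
    (hs15 : s.mem.readLE (e.reg .rsp - 8) 8 = (e.reg .r15).toNat)
    (hs14 : s.mem.readLE (e.reg .rsp - 16) 8 = (e.reg .r14).toNat)
    (hs13 : s.mem.readLE (e.reg .rsp - 24) 8 = (e.reg .r13).toNat)
    (hs12 : s.mem.readLE (e.reg .rsp - 32) 8 = (e.reg .r12).toNat)
    (hsbp : s.mem.readLE (e.reg .rsp - 40) 8 = (e.reg .rbp).toNat)
    (hsbx : s.mem.readLE (e.reg .rsp - 48) 8 = (e.reg .rbx).toNat)
    (hsra : UInt64.ofNat (s.mem.readLE (e.reg .rsp) 8) = ret)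
    (hsv : Mem.SameExcept
      [⟨(e.reg .rsp).toNat - 528, (e.reg .rsp).toNat⟩,
       ⟨gif - 24, gif - 16⟩,
       ⟨0xC00000 + gif / 8, 0xC00000 + (gif + 120 + 7) / 8⟩] v.mem s.mem)
    (hsame1 : Mem.SameExcept
      [⟨(e.reg .rsp).toNat - 528, (e.reg .rsp).toNat⟩,
       shadowSpan ((e.reg .rsp).toNat - 120) ((e.reg .rsp).toNat - 56),
       ⟨0x800000, 0x1000020⟩,
       ⟨(e.reg .rdx).toNat, (e.reg .rdx).toNat + 4⟩,
       ⟨R.cur, R.cur + 8⟩] e.mem s.mem)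
    (hinv1 : HeapInv ((Hc.release pv).release gif) rest (DGifOpen.framesIn frames e) ((e.reg .rsp).toNat - 120) s.mem)
    (hcodeIn : (conv u₀).code.In s.mem) (habi : (conv u₀).inv s) :
    d4_AtRet26 H rest frames R Hc gif pv u₀ e ret s := by
  have hcur := hctx.cursor_range hpre.inv.shadow
  have hbase : (Hc.release pv).base = 0x800000 := by
    show Hc.base = 0x800000
    rw [hat.region.1]
    exact hpre.base
  have hgin := d4_live_range hat.inv.heap hbase hat.live
  -- every window written misses the cursor …
  have hoffc : ∀ w, w ∈ [(⟨(e.reg .rsp).toNat - 528, (e.reg .rsp).toNat⟩ : Span), ⟨gif - 24, gif - 16⟩,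
      ⟨0xC00000 + gif / 8, 0xC00000 + (gif + 120 + 7) / 8⟩] → w.hi ≤ R.cur ∨ R.cur + 16 ≤ w.lo := by
    intro w hw
    simp only [List.mem_cons, List.not_mem_nil, or_false] at hw
    rcases hw with ew | ew | ew
    · rw [ew]
      simp only
      omega
    · rw [ew]
      simp only
      omega
    · rw [ew]
      simp only
      omega
  -- … and the constants
  have hoffk : ∀ w, w ∈ [(⟨(e.reg .rsp).toNat - 528, (e.reg .rsp).toNat⟩ : Span), ⟨gif - 24, gif - 16⟩,
      ⟨0xC00000 + gif / 8, 0xC00000 + (gif + 120 + 7) / 8⟩] → w.hi ≤ 0x141300 ∨ 0x14139a ≤ w.lo := by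
    intro w hw
    simp only [List.mem_cons, List.not_mem_nil, or_false] at hw
    rcases hw with ew | ew | ew
    · rw [ew]
      simp only
      omega
    · rw [ew]
      simp only
      omega
    · rw [ew]
      simp only
      omega
  have hrem1 : rem R s.mem = rem R v.mem := rem_sameExcept hsv (by omega) hoffc
  exact {
    core := {
      entry := hat.core.entry
      pre := hat.core.pre
      rip := hrip
      rsp := hrsp
      r12 := e12.trans hat.core.r12
      slot_r15 := hs15
      slot_r14 := hs14
      slot_r13 := hs13
      slot_r12 := hs12
      slot_rbp := hsbp
      slot_rbx := hsbx
      slot_ra := hsra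
      rem := by
        rw [hrem1]
        exact hat.core.rem
      same := hsame1
      code := hcodeIn
      abi := habi
    }
    region := hat.region
    inv := hinv1
    cursor := hat.cursor.sameExcept hsv (by omega) hoffc
    consts := hat.consts.sameExcept hsv hoffk
  }

/-- **1088B9H (ret25) … the call of `free(gif)` … 1088C1H (ret26)** (dgif_lib.c:223): gif is still live in `Hc.release pv`. -/
theorem d4_seg_free2 (Lay : Layout) (hLay : Lay.hi = 0x1000000) (μ : Microarch) (hμ : UserX.MicroOK μ) (u₀ : State)
    (hcode : HasCodeNat Lay u₀ Gif.L.DGifOpen.entry Gif.Code.code_DGifOpen.nat Gif.L.DGifOpen.size)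
    (H : Heap) (rest : List Obj) (frames : List (Nat × FrameLayout)) (R : Rd) (Hc : Heap) (gif pv : Nat) (e : State) (ret : Word)
    (h_free : Calls Lay μ ProgX.Base.WayInv (ProgX.Base.conv u₀) ProgX.Base.L.free.entry
      (ProgX.Base.Spec.free.spec (Hc.release pv) rest (DGifOpen.framesIn frames e) 120))
    (v : State) (hat : d4_AtRet25 H rest frames R Hc gif pv u₀ e ret v) :
    ReachVia Lay μ ProgX.Base.WayInv v (d4_AtRet26 H rest frames R Hc gif pv u₀ e ret) := by
  have hat0 := hat
  obtain ⟨hcore, hrbx, hregion, hinv, hlive, hcursor, hconsts⟩ := hat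
  have he := hcore.entry
  v_entry he
  obtain ⟨hpre, hctx, hcur0, hconsts0, hrdi, hrsi, herr⟩ := hcore.pre
  have w_rip := hcore.rip
  have c_rsp : v.reg .rsp = e.reg .rsp - 120 := hcore.rsp
  have w_kept : RegsKept [.rsp] v v := RegsKept.refl _ _
  have w_eq : Mem.EqOn ProgX.Base.L.textLo ProgX.Base.L.textHi u₀.mem v.mem := ProgX.Base.conv_code_eqOn hcore.code
  have hdf := (show abiInv _ from hcore.abi).1
  have hmx := (show abiInv _ from hcore.abi).2
  have hsse := ProgX.Base.sseOK_of_abiInv hcore.abi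
  have k_r15 : v.mem.readLE (e.reg .rsp - 8) 8 = (e.reg .r15).toNat := hcore.slot_r15
  have k_r14 : v.mem.readLE (e.reg .rsp - 16) 8 = (e.reg .r14).toNat := hcore.slot_r14
  have k_r13 : v.mem.readLE (e.reg .rsp - 24) 8 = (e.reg .r13).toNat := hcore.slot_r13
  have k_r12 : v.mem.readLE (e.reg .rsp - 32) 8 = (e.reg .r12).toNat := hcore.slot_r12
  have k_rbp : v.mem.readLE (e.reg .rsp - 40) 8 = (e.reg .rbp).toNat := hcore.slot_rbp
  have k_rbx : v.mem.readLE (e.reg .rsp - 48) 8 = (e.reg .rbx).toNat := hcore.slot_rbx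
  have k_ra : UInt64.ofNat (v.mem.readLE (e.reg .rsp) 8) = ret := hcore.slot_ra
  have hsame : Mem.SameExcept
    [⟨(e.reg .rsp).toNat - 528, (e.reg .rsp).toNat⟩,
     shadowSpan ((e.reg .rsp).toNat - 120) ((e.reg .rsp).toNat - 56),
     ⟨0x800000, 0x1000020⟩,
     ⟨(e.reg .rdx).toNat, (e.reg .rdx).toNat + 4⟩,
     ⟨R.cur, R.cur + 8⟩] e.mem v.mem := hcore.same
  have hcur := hctx.cursor_range hpre.inv.shadow
  -- the heap after the first `free` is at the place of the entry's; where gif is, as numbers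
  have hregion1 : SameRegion H (Hc.release pv) := hregion.trans (SameRegion.release Hc pv)
  have hbase : (Hc.release pv).base = 0x800000 := by
    rw [hregion1.1]
    exact hpre.base
  have hgin := d4_live_range hinv.heap hbase hlive
  have hg1 : 0x800040 ≤ gif := hgin.1
  have hg2 : gif + 120 + 32 ≤ 0xC00000 := hgin.2
  clear hgin
  have herange := d4_err_range herr hcur.1 hpre.inv
  -- THE WALK, to the return of `free(gif)`
  u_walk hcode [hμ.vendor] until [Gif.L.DGifOpen.ret26] span [ProgX.Base.L.textLo, ProgX.Base.L.textHi] side (v_side)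
  case call_inv =>
    v_inv
  case pre_1088bc =>
    -- 0x1088bc `free(GifFile)`: the heap's precondition for `Hc.release pv`; gif is live in it
    have hun : ShadowUntouched v.mem s_1088bc.mem := by v_untouched
    have hs : Mem.SameExcept [⟨(e.reg .rsp).toNat - 528, (e.reg .rsp).toNat⟩,
        ⟨(e.reg .rdx).toNat, (e.reg .rdx).toNat + 4⟩] v.mem s_1088bc.mem := by
      rw [w_mem]
      u_same
    refine ⟨d4_heapPre hpre hregion1 hinv hun hs herange.1 he_top (by rw [w_rsp]; u_omega), Or.inr ?_⟩
    rw [w_rdi, hrbx]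
    exact hlive
  -- 0x1088c1 (ret26): `free(gif)` HAS RETURNED: the heap is `(Hc.release pv).release gif`
  have hne : (s_1088bc.reg .rdi).toNat ≠ 0 := by
    rw [w_rdi_1088bc, hrbx]
    omega
  have hinv1 := w_post.2 hne
  rw [w_rdi_1088bc, hrbx] at hinv1
  clear w_post
  have e8 : (s_1088bc.reg .rsp).toNat + 8 = (e.reg .rsp).toNat - 120 := by
    rw [w_rsp_1088bc]
    u_omega
  rw [e8] at hinv1
  v_after_call w_rsp_1088bc w_mem_1088bc
  simp only [shadowSpan, w_rdi_1088bc, hrbx] at w_same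
  -- the slots and the return address, over the pushed return address (first step) and through `free`'s footprint (second step)
  have hp15 : s_1088bc.mem.readLE (e.reg .rsp - 8) 8 = (e.reg .r15).toNat := by
    rw [w_mem_1088bc]
    u_frame k_r15
  rw [w_mem_1088bc] at hp15
  have hs15 : s_1088bcr.mem.readLE (e.reg .rsp - 8) 8 = (e.reg .r15).toNat := by u_frame hp15
  have hp14 : s_1088bc.mem.readLE (e.reg .rsp - 16) 8 = (e.reg .r14).toNat := by
    rw [w_mem_1088bc]
    u_frame k_r14
  rw [w_mem_1088bc] at hp14
  have hs14 : s_1088bcr.mem.readLE (e.reg .rsp - 16) 8 = (e.reg .r14).toNat := by u_frame hp14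
  have hp13 : s_1088bc.mem.readLE (e.reg .rsp - 24) 8 = (e.reg .r13).toNat := by
    rw [w_mem_1088bc]
    u_frame k_r13
  rw [w_mem_1088bc] at hp13
  have hs13 : s_1088bcr.mem.readLE (e.reg .rsp - 24) 8 = (e.reg .r13).toNat := by u_frame hp13
  have hp12 : s_1088bc.mem.readLE (e.reg .rsp - 32) 8 = (e.reg .r12).toNat := by
    rw [w_mem_1088bc]
    u_frame k_r12
  rw [w_mem_1088bc] at hp12
  have hs12 : s_1088bcr.mem.readLE (e.reg .rsp - 32) 8 = (e.reg .r12).toNat := by u_frame hp12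
  have hpbp : s_1088bc.mem.readLE (e.reg .rsp - 40) 8 = (e.reg .rbp).toNat := by
    rw [w_mem_1088bc]
    u_frame k_rbp
  rw [w_mem_1088bc] at hpbp
  have hsbp : s_1088bcr.mem.readLE (e.reg .rsp - 40) 8 = (e.reg .rbp).toNat := by u_frame hpbp
  have hpbx : s_1088bc.mem.readLE (e.reg .rsp - 48) 8 = (e.reg .rbx).toNat := by
    rw [w_mem_1088bc]
    u_frame k_rbx
  rw [w_mem_1088bc] at hpbx
  have hsbx : s_1088bcr.mem.readLE (e.reg .rsp - 48) 8 = (e.reg .rbx).toNat := by u_frame hpbx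
  have hpra : UInt64.ofNat (s_1088bc.mem.readLE (e.reg .rsp) 8) = ret := by
    rw [w_mem_1088bc]
    u_frame k_ra
  rw [w_mem_1088bc] at hpra
  have hsra : UInt64.ofNat (s_1088bcr.mem.readLE (e.reg .rsp) 8) = ret := by u_frame hpra
  -- what was written since `v`, and since the entry
  have hsv : Mem.SameExcept
    [⟨(e.reg .rsp).toNat - 528, (e.reg .rsp).toNat⟩,
     ⟨gif - 24, gif - 16⟩,
     ⟨0xC00000 + gif / 8, 0xC00000 + (gif + 120 + 7) / 8⟩] v.mem s_1088bcr.mem := by u_same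
  have hsame1 : Mem.SameExcept
    [⟨(e.reg .rsp).toNat - 528, (e.reg .rsp).toNat⟩,
     shadowSpan ((e.reg .rsp).toNat - 120) ((e.reg .rsp).toNat - 56),
     ⟨0x800000, 0x1000020⟩,
     ⟨(e.reg .rdx).toNat, (e.reg .rdx).toNat + 4⟩,
     ⟨R.cur, R.cur + 8⟩] e.mem s_1088bcr.mem := by u_same
  exact ReachVia.done (d4_atRet26_of hat0 hctx hpre he_room w_rip w_rsp (w_kept.get .r12 rfl)
    hs15 hs14 hs13 hs12 hsbp hsbx hsra hsv hsame1 hinv1 w_code w_inv)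

/-- **1088C1H (ret26) … 108816H** (dgif_lib.c:224 `return NULL`): `ebx = 0`, the jump to the epilogue: `Done` with the heap
`(Hc.release pv).release gif` and the result NULL. Nothing is written. -/
theorem d4_seg_null (Lay : Layout) (hLay : Lay.hi = 0x1000000) (μ : Microarch) (hμ : UserX.MicroOK μ) (u₀ : State)
    (hcode : HasCodeNat Lay u₀ Gif.L.DGifOpen.entry Gif.Code.code_DGifOpen.nat Gif.L.DGifOpen.size)
    (H : Heap) (rest : List Obj) (frames : List (Nat × FrameLayout)) (R : Rd) (Hc : Heap) (gif pv : Nat) (e : State) (ret : Word)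
    (v : State) (hat : d4_AtRet26 H rest frames R Hc gif pv u₀ e ret v) :
    ReachVia Lay μ ProgX.Base.WayInv v (DGifOpen.Exit H rest frames R u₀ e ret) := by
  obtain ⟨hcore, hregion, hinv, hcursor, hconsts⟩ := hat
  have he := hcore.entry
  v_entry he
  have w_rip := hcore.rip
  have c_rsp : v.reg .rsp = e.reg .rsp - 120 := hcore.rsp
  have w_kept : RegsKept [.rsp] v v := RegsKept.refl _ _
  have w_eq : Mem.EqOn ProgX.Base.L.textLo ProgX.Base.L.textHi u₀.mem v.mem := ProgX.Base.conv_code_eqOn hcore.code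
  have hdf := (show abiInv _ from hcore.abi).1
  have hmx := (show abiInv _ from hcore.abi).2
  have hsse := ProgX.Base.sseOK_of_abiInv hcore.abi
  -- THE WALK: two instructions
  u_walk hcode [hμ.vendor] until [Gif.L.DGifOpen.at_108816] span [ProgX.Base.L.textLo, ProgX.Base.L.textHi] side (v_side)
  -- 0x108816: the exit assertion `Done`, field by field (the memory is `v`'s)
  have habi : (conv u₀).inv s_1088c6 := by
    refine ProgX.Base.abiInv_of ?_ ?_
    · rw [w_flags]
      exact hdf
    · rw [w_mxcsr]
      exact hmx
  refine ReachVia.done ⟨(Hc.release pv).release gif, ?_⟩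
  exact {
    core := {
      entry := hcore.entry
      pre := hcore.pre
      rip := w_rip
      rsp := w_rsp
      r12 := (w_kept.get .r12 rfl).trans hcore.r12
      slot_r15 := by
        rw [w_mem]
        exact hcore.slot_r15
      slot_r14 := by
        rw [w_mem]
        exact hcore.slot_r14
      slot_r13 := by
        rw [w_mem]
        exact hcore.slot_r13
      slot_r12 := by
        rw [w_mem]
        exact hcore.slot_r12
      slot_rbp := by
        rw [w_mem]
        exact hcore.slot_rbp
      slot_rbx := by
        rw [w_mem]
        exact hcore.slot_rbx
      slot_ra := by
        rw [w_mem]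
        exact hcore.slot_ra
      rem := by
        rw [w_mem]
        exact hcore.rem
      same := by
        rw [w_mem]
        exact hcore.same
      code := ProgX.Base.conv_code_in w_eq
      abi := habi
    }
    region := (hregion.trans (SameRegion.release Hc pv)).trans (SameRegion.release (Hc.release pv) gif)
    inv := by
      rw [w_mem]
      exact hinv
    cursor := by
      rw [w_mem]
      exact hcursor
    consts := by
      rw [w_mem]
      exact hconsts
    res := by
      left
      rw [w_rbx]
      decide
  }

end Gif.Spec.DGifOpen_4
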